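-- pv_equiv track=rewrite | github.com/kevincaria/estructuraDeDatosConPython | PrimerParcial/Unidad3/tp3.py | baldosasColocadas
-- ===== SOURCE A (Python) =====
-- def baldosasColocadas(dia):
--     cantidad = 0
--     if dia == 1:
--         cantidad = 100
--     elif(dia % 2 == 0):
--         cantidad += baldosasColocadas(dia-1)*2
--     else:
--         cantidad += baldosasColocadas(dia-2) + baldosasColocadas(dia -1)
--     return cantidad
-- ===== SOURCE B (Python) =====
-- def baldosasColocadas(dia):
--     prev2, prev1 = 0, 100
--     for d in range(2, dia + 1):
--         if d % 2 == 0: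
--             cur = prev1 * 2
--         else:
--             cur = prev2 + prev1
--         prev2, prev1 = prev1, cur
--     return prev1
-- ===== Notes on version B (the rewrite author's own statement) =====
-- stated objective: faster
-- what changed: Replaces the exponential two-branch recursion with a bottom-up iterative DP keeping only the last two day counts.
import Mathlib
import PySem

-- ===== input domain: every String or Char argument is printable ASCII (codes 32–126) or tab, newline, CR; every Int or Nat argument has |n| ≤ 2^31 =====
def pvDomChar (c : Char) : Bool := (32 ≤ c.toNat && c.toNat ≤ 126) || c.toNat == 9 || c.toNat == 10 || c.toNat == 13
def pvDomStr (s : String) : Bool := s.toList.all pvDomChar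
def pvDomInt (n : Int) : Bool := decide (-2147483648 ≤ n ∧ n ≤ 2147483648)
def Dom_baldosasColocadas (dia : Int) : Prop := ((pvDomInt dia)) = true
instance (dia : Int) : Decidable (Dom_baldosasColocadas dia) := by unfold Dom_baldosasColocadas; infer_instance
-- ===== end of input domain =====

-- B replaces A's exponential two-branch recursion by a bottom-up linear DP keeping the last two day counts (asymptotically faster).

-- ===== PORT A =====
-- A recurses with dia-1 / dia-2 down to the base case dia == 1; in Lean the recursion is
-- driven by a fuel counter dia.toNat, which suffices for every dia ≥ 1 (fuel 0 is only
-- reached on inputs where the Python recursion does not terminate, excluded by Pre_).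
def baldosasColocadasFuel : Nat → Int → Int
  | 0, _ => 0
  | f + 1, dia =>
    if dia = 1 then 100
    else if PySem.Int.mod dia 2 = 0 then baldosasColocadasFuel f (dia - 1) * 2
    else baldosasColocadasFuel f (dia - 2) + baldosasColocadasFuel f (dia - 1)

def baldosasColocadas (dia : Int) : Int := baldosasColocadasFuel dia.toNat dia

-- ===== PORT B =====
def baldosasColocadas_alt (dia : Int) : Int :=
  ((PySem.List.pyRange 2 (dia + 1) 1).foldl
    (fun (st : Int × Int) d =>
      (st.2, if PySem.Int.mod d 2 = 0 then st.2 * 2 else st.1 + st.2))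
    (0, 100)).2

-- ===== PRECONDITION & SPEC =====
-- Pre_ excludes non-positive days, on which the Python A never reaches its base case and raises RecursionError.
def Pre_baldosasColocadas (dia : Int) : Prop := 1 ≤ dia
instance (dia : Int) : Decidable (Pre_baldosasColocadas dia) := by unfold Pre_baldosasColocadas; infer_instance
def pvWitness_baldosasColocadas : Int := (3)

def Spec_baldosasColocadas (dia : Int) (out : Int) : Prop := out = baldosasColocadas_alt dia
instance (dia : Int) (out : Int) : Decidable (Spec_baldosasColocadas dia out) := by unfold Spec_baldosasColocadas; infer_instance

-- ===== CLAIM (what is proved, stated in full; the proofs are below) =====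
def Claim_equal_baldosasColocadas : Prop := ∀ (dia : Int), Dom_baldosasColocadas dia → Pre_baldosasColocadas dia → Spec_baldosasColocadas dia (baldosasColocadas dia)

-- ===== LEMMAS AND PROOFS =====

-- reference function: the day-n count, by structural recursion on Nat
def refBaldosas : Nat → Int
  | 0 => 100
  | 1 => 100
  | n + 2 => if (n + 2) % 2 = 0 then refBaldosas (n + 1) * 2
             else refBaldosas n + refBaldosas (n + 1)

lemma fuel_eq_ref : ∀ (f n : Nat), 1 ≤ n → n ≤ f → baldosasColocadasFuel f (n : Int) = refBaldosas n := by
  intro f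
  induction f with
  | zero => intro n h1 h2; omega
  | succ f ih =>
    intro n h1 h2
    match n, h1 with
    | 1, _ => simp [baldosasColocadasFuel, refBaldosas]
    | (m + 2), _ =>
      have hmod : PySem.Int.mod ((m + 2 : Nat) : Int) 2 = (((m + 2) % 2 : Nat) : Int) := by
        exact_mod_cast PySem.Int.mod_natCast (m + 2) 2
      have h1' : ((m + 2 : Nat) : Int) - 1 = ((m + 1 : Nat) : Int) := by push_cast; ring
      have h2' : ((m + 2 : Nat) : Int) - 2 = ((m : Nat) : Int) := by push_cast; ring
      by_cases hpar : (m + 2) % 2 = 0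
      · have : baldosasColocadasFuel (f + 1) ((m + 2 : Nat) : Int)
            = baldosasColocadasFuel f ((m + 1 : Nat) : Int) * 2 := by
          simp only [baldosasColocadasFuel, hmod, h1']
          rw [if_neg (by exact_mod_cast by omega), if_pos (by exact_mod_cast hpar)]
        rw [this, ih (m + 1) (by omega) (by omega), refBaldosas, if_pos hpar]
      · have hm1 : 1 ≤ m := by omega
        have : baldosasColocadasFuel (f + 1) ((m + 2 : Nat) : Int)
            = baldosasColocadasFuel f ((m : Nat) : Int) + baldosasColocadasFuel f ((m + 1 : Nat) : Int) := by
          simp only [baldosasColocadasFuel, hmod, h1', h2']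
          rw [if_neg (by exact_mod_cast by omega), if_neg (by exact_mod_cast fun h => hpar (by exact_mod_cast h))]
        rw [this, ih m (by omega) (by omega), ih (m + 1) (by omega) (by omega),
          refBaldosas, if_neg hpar]

-- loop invariant for B: after processing range(2, n+3) the state is (day n+1, day n+2)
lemma alt_fold_inv : ∀ (m : Nat),
    ((PySem.List.pyRange 2 ((m + 2 : Nat) + 1) 1).foldl
      (fun (st : Int × Int) d =>
        (st.2, if PySem.Int.mod d 2 = 0 then st.2 * 2 else st.1 + st.2))
      (0, 100)) = (refBaldosas (m + 1), refBaldosas (m + 2)) := by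
  intro m
  induction m with
  | zero => decide
  | succ m ih =>
    have hstep : ((m + 1 + 2 : Nat) : Int) + 1 = (((m + 2 : Nat) : Int) + 1) + 1 := by push_cast; ring
    rw [hstep, PySem.List.pyRange_one_succ_right (by push_cast; omega), List.foldl_append]
    push_cast at ih ⊢
    rw [ih]
    have hmod : PySem.Int.mod ((m : Int) + 2 + 1) 2 = (((m + 3) % 2 : Nat) : Int) := by
      have := PySem.Int.mod_natCast (m + 3) 2
      push_cast at this ⊢
      convert this using 2
    have hr : refBaldosas (m + 1 + 2) = if (m + 3) % 2 = 0 then refBaldosas (m + 2) * 2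
        else refBaldosas (m + 1) + refBaldosas (m + 2) := by
      show refBaldosas ((m + 1) + 2) = _
      rw [refBaldosas]
    simp only [List.foldl_cons, List.foldl_nil, hmod, hr]
    by_cases hpar : (m + 3) % 2 = 0
    · rw [if_pos (by exact_mod_cast hpar), if_pos hpar]
    · rw [if_neg (by exact_mod_cast fun h => hpar (by exact_mod_cast h)), if_neg hpar]

lemma alt_eq_ref (n : Nat) (h : 1 ≤ n) : baldosasColocadas_alt (n : Int) = refBaldosas n := by
  match n, h with
  | 1, _ =>
    unfold baldosasColocadas_alt
    norm_num [PySem.List.pyRange_one_eq_nil, refBaldosas]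
  | (m + 2), _ =>
    unfold baldosasColocadas_alt
    rw [alt_fold_inv m]

-- ===== VERDICT (by name: the statement is the Claim_ definition above) =====
theorem baldosasColocadas_spec : Claim_equal_baldosasColocadas := by
  intro dia _ hpre
  have h1 : 1 ≤ dia := hpre
  have hn : dia = ((dia.toNat : Nat) : Int) := by omega
  unfold Spec_baldosasColocadas baldosasColocadas
  rw [hn, Int.toNat_natCast, fuel_eq_ref dia.toNat dia.toNat (by omega) (le_refl _),
    alt_eq_ref dia.toNat (by omega)]
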